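-- pv_equiv track=rewrite | github.com/JohanAlvedal/PumpSteer | tests/test_state_transitions.py | simulate_brake_states
-- ===== SOURCE A (Python) =====
-- PRICE_EXPENSIVE = "expensive"
--
-- def simulate_brake_states(categories, bridge_max_slots=2):
--     """
--     Enkel testsimulator för önskat beteende:
--     - börja bromsa ett steg innan expensive
--     - håll bromsen under expensive
--     - håll kvar bromsen över kort cheap/normal dipp
--     - släpp bromsen först när billig period är tillräckligt lång
--     """
--     states = []
--     brake_active = False
--
--     for i, current in enumerate(categories):
--         next_cat = categories[i + 1] if i + 1 < len(categories) else None
--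
--         # Aktiv dyrperiod
--         if current == PRICE_EXPENSIVE:
--             brake_active = True
--             states.append("PRICE_BRAKE")
--             continue
--
--         # Kort dipp mellan dyra block -> håll kvar om bromsen redan är aktiv
--         if brake_active and current != PRICE_EXPENSIVE:
--             future_window = categories[i + 1 : i + 1 + bridge_max_slots]
--             if PRICE_EXPENSIVE in future_window:
--                 states.append("HOLD")
--                 continue
--
--             brake_active = False
--             states.append("RAMP_DOWN")
--             continue
--
--         # Pre-brake: starta innan dyrperiod, men bara om bromsen inte redan är aktiv
--         if not brake_active and current != PRICE_EXPENSIVE and next_cat == PRICE_EXPENSIVE: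
--             brake_active = True
--             states.append("PRE_BRAKE")
--             continue
--
--         states.append("NORMAL")
--
--     return states
-- ===== SOURCE B (Python) =====
-- PRICE_EXPENSIVE = "expensive"
--
-- def simulate_brake_states(categories, bridge_max_slots=2):
--     # Backward pass: dist[i] = number of steps from i to the next expensive
--     # slot strictly after i (None if there is none).
--     dist = []
--     d = None
--     for cur in reversed(categories):
--         dist.append(d)
--         if cur == PRICE_EXPENSIVE:
--             d = 1
--         elif d is not None:
--             d += 1
--     dist.reverse()
--
--     states = []
--     brake_active = False
--     for current, dnext in zip(categories, dist):
--         if current == PRICE_EXPENSIVE: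
--             brake_active = True
--             states.append("PRICE_BRAKE")
--         elif brake_active:
--             if dnext is not None and dnext <= bridge_max_slots:
--                 states.append("HOLD")
--             else:
--                 brake_active = False
--                 states.append("RAMP_DOWN")
--         elif dnext == 1:
--             brake_active = True
--             states.append("PRE_BRAKE")
--         else:
--             states.append("NORMAL")
--     return states
-- ===== Notes on version B (the rewrite author's own statement) =====
-- stated objective: alternative
-- what changed: Replaced A's per-step future-window slice-and-scan by a single backward pass precomputing the distance to the next expensive slot, which the forward state loop then consults in O(1).
-- intended difference: When bridge_max_slots is so negative that the slice stop index i+1+bridge_max_slots goes below 0, Python's slice wraps to the end of the list and A emits a phantom HOLD right after an expensive slot; B treats the look-ahead window as empty and emits RAMP_DOWN (and releases the brake), which is the intended meaning of a non-positive bridge. — e.g. on simulate_brake_states(["expensive", "cheap", "expensive", "cheap", "cheap"], -3): A returns ["PRICE_BRAKE", "HOLD", "PRICE_BRAKE", "RAMP_DOWN", "NORMAL"], B returns ["PRICE_BRAKE", "RAMP_DOWN", "PRICE_BRAKE", "RAMP_DOWN", "NORMAL"]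
import Mathlib
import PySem

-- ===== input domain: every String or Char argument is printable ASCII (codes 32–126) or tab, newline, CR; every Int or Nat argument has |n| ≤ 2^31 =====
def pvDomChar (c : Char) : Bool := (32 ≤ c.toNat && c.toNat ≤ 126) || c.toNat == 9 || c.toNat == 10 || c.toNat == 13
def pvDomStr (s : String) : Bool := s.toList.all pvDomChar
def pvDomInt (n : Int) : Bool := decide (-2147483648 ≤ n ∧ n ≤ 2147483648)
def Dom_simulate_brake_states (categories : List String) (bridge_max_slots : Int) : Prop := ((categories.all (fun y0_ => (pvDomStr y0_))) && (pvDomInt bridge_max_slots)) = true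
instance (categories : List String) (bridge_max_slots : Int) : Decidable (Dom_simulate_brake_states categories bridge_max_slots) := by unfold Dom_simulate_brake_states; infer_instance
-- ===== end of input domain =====

-- B replaces the per-step slice-and-scan for a coming "expensive" slot by one backward
-- pass that precomputes the distance to the next expensive slot (objective: alternative).

-- ===== PORT A =====
-- loop body of A (one iteration of `for i, current in enumerate(categories)`)
def pvStepA (categories : List String) (bridge_max_slots : Int)
    (st : Bool × List String) (p : Int × String) : Bool × List String :=
  let next_cat : Option String :=
    if p.1 + 1 < (categories.length : Int) then PySem.List.pyGet? categories (p.1 + 1) else none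
  if p.2 = "expensive" then (true, st.2 ++ ["PRICE_BRAKE"])
  else if st.1 then
    if "expensive" ∈ PySem.List.slice categories (some (p.1 + 1)) (some (p.1 + 1 + bridge_max_slots)) then
      (true, st.2 ++ ["HOLD"])
    else
      (false, st.2 ++ ["RAMP_DOWN"])
  else if next_cat = some "expensive" then (true, st.2 ++ ["PRE_BRAKE"])
  else (st.1, st.2 ++ ["NORMAL"])

def simulate_brake_states (categories : List String) (bridge_max_slots : Int) : List String :=
  ((PySem.List.enumerate categories 0).foldl (pvStepA categories bridge_max_slots) (false, [])).2

-- ===== PORT B =====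
-- backward pass of Source B: first component = running distance `d`, second = the dist table
def pvDistTable (categories : List String) : Option Int × List (Option Int) :=
  categories.foldr
    (fun c p => (if c = "expensive" then some 1 else p.1.map (· + 1), p.1 :: p.2))
    (none, [])

-- loop body of B's forward pass over `zip(categories, dist)`
def pvStepB (bridge_max_slots : Int) (st : Bool × List String) (p : String × Option Int) :
    Bool × List String :=
  if p.1 = "expensive" then (true, st.2 ++ ["PRICE_BRAKE"])
  else if st.1 then
    match p.2 with
    | some d => if d ≤ bridge_max_slots then (true, st.2 ++ ["HOLD"]) else (false, st.2 ++ ["RAMP_DOWN"])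
    | none => (false, st.2 ++ ["RAMP_DOWN"])
  else if p.2 = some (1 : Int) then (true, st.2 ++ ["PRE_BRAKE"])
  else (st.1, st.2 ++ ["NORMAL"])

def simulate_brake_states_alt (categories : List String) (bridge_max_slots : Int) : List String :=
  ((categories.zip (pvDistTable categories).2).foldl (pvStepB bridge_max_slots) (false, [])).2

-- ===== PRECONDITION & SPEC =====
-- When bridge_max_slots is so negative that the stop index i+1+bridge_max_slots of the
-- look-ahead slice becomes negative, Python's slice wraps to the END of the list, so A can
-- emit a phantom "HOLD" right after an expensive slot; B treats the look-ahead window as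
-- empty there and emits "RAMP_DOWN", which is the intended meaning of a non-positive bridge.
def D_simulate_brake_states (categories : List String) (bridge_max_slots : Int) : Prop :=
  bridge_max_slots < 0 ∧
  ∃ i < categories.length, 1 ≤ i ∧
    categories[i-1]? = some "expensive" ∧ categories[i]? ≠ some "expensive" ∧
    (i : Int) + 1 + bridge_max_slots < 0 ∧
    ∃ j < categories.length, i < j ∧
      (j : Int) < (categories.length : Int) + (i : Int) + 1 + bridge_max_slots ∧
      categories[j]? = some "expensive"

instance (categories : List String) (bridge_max_slots : Int) :
    Decidable (D_simulate_brake_states categories bridge_max_slots) := by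
  unfold D_simulate_brake_states; infer_instance

def Spec_simulate_brake_states (categories : List String) (bridge_max_slots : Int) (out : List String) : Prop := ¬ D_simulate_brake_states categories bridge_max_slots → out = simulate_brake_states_alt categories bridge_max_slots
instance (categories : List String) (bridge_max_slots : Int) (out : List String) : Decidable (Spec_simulate_brake_states categories bridge_max_slots out) := by unfold Spec_simulate_brake_states; infer_instance

def pvDiffWitness_simulate_brake_states : List String × Int :=
  (["expensive", "cheap", "expensive", "cheap", "cheap"], -3)

def pvDiffWitnessOut_simulate_brake_states : (List String) × (List String) :=
  (["PRICE_BRAKE", "HOLD", "PRICE_BRAKE", "RAMP_DOWN", "NORMAL"],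
   ["PRICE_BRAKE", "RAMP_DOWN", "PRICE_BRAKE", "RAMP_DOWN", "NORMAL"])

-- ===== CLAIM (what is proved, stated in full; the proofs are below) =====
def Claim_unchanged_simulate_brake_states : Prop := ∀ (categories : List String) (bridge_max_slots : Int), Dom_simulate_brake_states categories bridge_max_slots → Spec_simulate_brake_states categories bridge_max_slots (simulate_brake_states categories bridge_max_slots)
def Claim_changed_simulate_brake_states : Prop := Dom_simulate_brake_states (pvDiffWitness_simulate_brake_states.1) (pvDiffWitness_simulate_brake_states.2) ∧ D_simulate_brake_states (pvDiffWitness_simulate_brake_states.1) (pvDiffWitness_simulate_brake_states.2) ∧ simulate_brake_states (pvDiffWitness_simulate_brake_states.1) (pvDiffWitness_simulate_brake_states.2) = pvDiffWitnessOut_simulate_brake_states.1 ∧ simulate_brake_states_alt (pvDiffWitness_simulate_brake_states.1) (pvDiffWitness_simulate_brake_states.2) = pvDiffWitnessOut_simulate_brake_states.2 ∧ pvDiffWitnessOut_simulate_brake_states.1 ≠ pvDiffWitnessOut_simulate_brake_states.2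

def Claim_exact_simulate_brake_states : Prop := ∀ (categories : List String) (bridge_max_slots : Int), Dom_simulate_brake_states categories bridge_max_slots → D_simulate_brake_states categories bridge_max_slots → simulate_brake_states categories bridge_max_slots ≠ simulate_brake_states_alt categories bridge_max_slots

-- ===== LEMMAS AND PROOFS =====

theorem pvDistTable_cons (c : String) (l : List String) :
    pvDistTable (c :: l) =
      (if c = "expensive" then some 1 else (pvDistTable l).1.map (· + 1),
       (pvDistTable l).1 :: (pvDistTable l).2) := by
  simp [pvDistTable]

theorem pvDistTable_pos : ∀ (l : List String) (d : Int), (pvDistTable l).1 = some d → 1 ≤ d := by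
  intro l
  induction l with
  | nil => intro d h; simp [pvDistTable] at h
  | cons c t ih =>
    intro d h
    rw [pvDistTable_cons] at h
    by_cases hc : c = "expensive"
    · simp [hc] at h; omega
    · simp [hc] at h
      obtain ⟨d', hd', rfl⟩ := h
      have := ih d' hd'
      omega

-- membership of "expensive" in a length-m prefix, via the dist head
theorem pvDistTable_mem : ∀ (l : List String) (m : Nat),
    ("expensive" ∈ l.take m ↔ ∃ d : Int, (pvDistTable l).1 = some d ∧ d ≤ (m : Int)) := by
  intro l
  induction l with
  | nil => intro m; simp [pvDistTable]
  | cons c t ih =>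
    intro m
    cases m with
    | zero =>
      simp only [List.take_zero, List.not_mem_nil, false_iff]
      rintro ⟨d, hd, hle⟩
      have := pvDistTable_pos _ _ hd
      omega
    | succ m' =>
      rw [List.take_succ_cons, List.mem_cons, ih m', pvDistTable_cons]
      by_cases hc : c = "expensive"
      · simp [hc]
      · simp only [hc, if_false]
        constructor
        · rintro (h | ⟨d, hd, hle⟩)
          · exact absurd h.symm hc
          · exact ⟨d + 1, by simp [hd], by push_cast; omega⟩
        · rintro ⟨d, hd, hle⟩
          obtain ⟨d', hd', rfl⟩ := Option.map_eq_some_iff.mp hd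
          exact Or.inr ⟨d', hd', by push_cast at hle ⊢; omega⟩

theorem pvDistTable_one (l : List String) :
    (pvDistTable l).1 = some 1 ↔ l.head? = some "expensive" := by
  cases l with
  | nil => simp [pvDistTable]
  | cons c t =>
    rw [pvDistTable_cons]
    by_cases hc : c = "expensive"
    · simp [hc]
    · simp only [hc, if_false, List.head?_cons]
      constructor
      · intro h
        obtain ⟨d', hd', heq⟩ := Option.map_eq_some_iff.mp h
        have := pvDistTable_pos _ _ hd'
        omega
      · intro h; simp at h; exact absurd h hc

theorem pvClampNeg (n : Nat) (b : Int) (hb : b < 0) :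
    PySem.List.clampIdx n b = n - (-b).toNat := by
  have h1 : b = -(((-b).toNat : Nat) : Int) := by omega
  rw [h1, PySem.List.clampIdx_neg_natCast _ _ (by omega)]; omega

theorem pvLoop_eq (cats : List String) (k : Int)
    (hND : ¬ D_simulate_brake_states cats k) :
    ∀ (suf : List String) (iN : Nat) (b : Bool) (acc : List String),
      suf = cats.drop iN →
      (b = true → k < 0 → 1 ≤ iN ∧ (cats[iN-1]? = some "expensive" ∨ cats[iN]? = some "expensive")) →
      (suf.zip (pvDistTable suf).2).foldl (pvStepB k) (b, acc) =
        (PySem.List.enumerate suf (iN : Int)).foldl (pvStepA cats k) (b, acc) := by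
  intro suf
  induction suf with
  | nil => intro iN b acc _ _; simp [pvDistTable, PySem.List.enumerate_nil]
  | cons c rest ih =>
    intro iN b acc hsuf hinv
    have hlt : iN < cats.length := by
      by_contra hge
      rw [List.drop_eq_nil_of_le (by omega)] at hsuf
      simp at hsuf
    have hc : cats[iN]? = some c := by
      have h : (cats.drop iN).head? = cats[iN]? := List.head?_drop
      rw [← hsuf] at h
      simpa using h.symm
    have hrest : rest = cats.drop (iN + 1) := by
      have h2 := congrArg List.tail hsuf
      simpa [List.tail_drop] using h2
    rw [pvDistTable_cons, List.zip_cons_cons, List.foldl_cons, PySem.List.enumerate_cons,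
      List.foldl_cons]
    have hcast : (iN : Int) + 1 = ((iN + 1 : Nat) : Int) := by push_cast; ring
    by_cases hcexp : c = "expensive"
    · have hA : pvStepA cats k (b, acc) ((iN : Int), c) = (true, acc ++ ["PRICE_BRAKE"]) := by
        simp [pvStepA, hcexp]
      have hB : pvStepB k (b, acc) (c, (pvDistTable rest).1) = (true, acc ++ ["PRICE_BRAKE"]) := by
        simp [pvStepB, hcexp]
      rw [hA, hB, hcast]
      exact ih (iN + 1) true (acc ++ ["PRICE_BRAKE"]) hrest
        (fun _ _ => ⟨by omega, Or.inl (by simpa using hc.trans (by rw [hcexp]))⟩)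
    · by_cases hb : b = true
      · subst hb
        have htest : ("expensive" ∈ PySem.List.slice cats (some ((iN : Int) + 1))
              (some ((iN : Int) + 1 + k))) ↔
            (∃ d : Int, (pvDistTable rest).1 = some d ∧ d ≤ k) := by
          rcases le_or_gt 0 k with hk | hk
          · have hs : PySem.List.slice cats (some ((iN : Int) + 1)) (some ((iN : Int) + 1 + k)) =
                (cats.drop (iN + 1)).take k.toNat := by
              rw [hcast, show ((iN + 1 : Nat) : Int) + k = ((iN + 1 : Nat) : Int) + ((k.toNat : Nat) : Int) by omega]
              exact PySem.List.slice_natCast_add ..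
            rw [hs, ← hrest, pvDistTable_mem]
            constructor
            · rintro ⟨d, hd, hle⟩; exact ⟨d, hd, by omega⟩
            · rintro ⟨d, hd, hle⟩; exact ⟨d, hd, by omega⟩
          · constructor
            · intro hmem
              exfalso
              rcases le_or_gt 0 ((iN : Int) + 1 + k) with hnn | hneg
              · rw [PySem.List.slice_toNat,
                  show ((iN : Int) + 1 + k).toNat - ((iN : Int) + 1).toNat = 0 by omega] at hmem
                · simp at hmem
                · omega
                · omega
              · -- wrapped negative stop: membership would witness D_
                apply hND
                set m := (-((iN : Int) + 1 + k)).toNat with hmdef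
                have hmInt : (m : Int) = -((iN : Int) + 1 + k) := by omega
                have hmin : min (iN + 1) cats.length = iN + 1 := by omega
                have hslice : PySem.List.slice cats (some ((iN : Int) + 1)) (some ((iN : Int) + 1 + k)) =
                    (cats.drop (iN + 1)).take (cats.length - m - (iN + 1)) := by
                  have hs0 : PySem.List.slice cats (some ((iN : Int) + 1)) (some ((iN : Int) + 1 + k)) =
                      (cats.drop (PySem.List.clampIdx cats.length ((iN : Int) + 1))).take
                        (PySem.List.clampIdx cats.length ((iN : Int) + 1 + k) -
                          PySem.List.clampIdx cats.length ((iN : Int) + 1)) := by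
                    simp [PySem.List.slice]
                  rw [hs0, pvClampNeg _ _ hneg, hcast, PySem.List.clampIdx_natCast, hmin]
                  congr 1
                rw [hslice] at hmem
                obtain ⟨p, hp, hpeq⟩ := List.mem_take_iff_getElem.mp hmem
                have hdlen : (cats.drop (iN + 1)).length = cats.length - (iN + 1) :=
                  List.length_drop
                have hp1 : p < cats.length - m - (iN + 1) := lt_of_lt_of_le hp (min_le_left _ _)
                have hp2 : p < cats.length - (iN + 1) := by
                  have h := lt_of_lt_of_le hp (min_le_right _ _)
                  rwa [hdlen] at h
                obtain ⟨h1iN, hdisj⟩ := hinv rfl hk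
                have hprev : cats[iN - 1]? = some "expensive" := by
                  rcases hdisj with h | h
                  · exact h
                  · rw [hc] at h; simp at h; exact absurd h hcexp
                refine ⟨by omega, iN, hlt, h1iN, hprev, by rw [hc]; simp [hcexp], hneg,
                  iN + 1 + p, by omega, by omega, by omega, ?_⟩
                have hopt : (cats.drop (iN + 1))[p]? = some "expensive" := by
                  rw [List.getElem?_eq_getElem (by omega)]
                  exact congrArg some hpeq
                rwa [List.getElem?_drop] at hopt
            · rintro ⟨d, hd, hle⟩
              have := pvDistTable_pos _ _ hd
              omega
        by_cases hEx : ∃ d : Int, (pvDistTable rest).1 = some d ∧ d ≤ k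
        · -- HOLD on both sides
          have hA : pvStepA cats k (true, acc) ((iN : Int), c) = (true, acc ++ ["HOLD"]) := by
            simp [pvStepA, hcexp, htest.mpr hEx]
          obtain ⟨d, hd, hle⟩ := hEx
          have hB : pvStepB k (true, acc) (c, (pvDistTable rest).1) = (true, acc ++ ["HOLD"]) := by
            simp [pvStepB, hcexp, hd, hle]
          rw [hA, hB, hcast]
          refine ih (iN + 1) true (acc ++ ["HOLD"]) hrest (fun _ hk => absurd hk ?_)
          have := pvDistTable_pos _ _ hd
          omega
        · -- RAMP_DOWN on both sides
          have hA : pvStepA cats k (true, acc) ((iN : Int), c) = (false, acc ++ ["RAMP_DOWN"]) := by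
            have hnm : "expensive" ∉ PySem.List.slice cats (some ((iN : Int) + 1))
                (some ((iN : Int) + 1 + k)) := fun h => hEx (htest.mp h)
            simp [pvStepA, hcexp, hnm]
          have hB : pvStepB k (true, acc) (c, (pvDistTable rest).1) = (false, acc ++ ["RAMP_DOWN"]) := by
            cases hd : (pvDistTable rest).1 with
            | none => simp [pvStepB, hcexp]
            | some d =>
              have hnle : ¬ d ≤ k := fun hle => hEx ⟨d, hd, hle⟩
              simp [pvStepB, hcexp, hnle]
          rw [hA, hB, hcast]
          exact ih (iN + 1) false (acc ++ ["RAMP_DOWN"]) hrest (by simp)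
      · have hbf : b = false := by cases b with | true => exact absurd rfl hb | false => rfl
        subst hbf
        have hnext : (if (iN : Int) + 1 < (cats.length : Int) then
              PySem.List.pyGet? cats ((iN : Int) + 1) else none) = rest.head? := by
          by_cases hlt2 : iN + 1 < cats.length
          · rw [if_pos (by omega), hcast, PySem.List.pyGet?_natCast,
              hrest, List.head?_drop]
          · rw [if_neg (by omega), hrest,
              List.drop_eq_nil_of_le (by omega)]
            rfl
        by_cases hpre : (pvDistTable rest).1 = some 1
        · have hhead : rest.head? = some "expensive" := (pvDistTable_one rest).mp hpre
          have hA : pvStepA cats k (false, acc) ((iN : Int), c) = (true, acc ++ ["PRE_BRAKE"]) := by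
            simp [pvStepA, hcexp, hnext, hhead]
          have hB : pvStepB k (false, acc) (c, (pvDistTable rest).1) = (true, acc ++ ["PRE_BRAKE"]) := by
            simp [pvStepB, hcexp, hpre]
          rw [hA, hB, hcast]
          refine ih (iN + 1) true (acc ++ ["PRE_BRAKE"]) hrest (fun _ _ => ⟨by omega, Or.inr ?_⟩)
          rw [← List.head?_drop, ← hrest]; exact hhead
        · have hhead : rest.head? ≠ some "expensive" :=
            fun h => hpre ((pvDistTable_one rest).mpr h)
          have hA : pvStepA cats k (false, acc) ((iN : Int), c) = (false, acc ++ ["NORMAL"]) := by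
            simp [pvStepA, hcexp, hnext, hhead]
          have hB : pvStepB k (false, acc) (c, (pvDistTable rest).1) = (false, acc ++ ["NORMAL"]) := by
            simp [pvStepB, hcexp, hpre]
          rw [hA, hB, hcast]
          exact ih (iN + 1) false (acc ++ ["NORMAL"]) hrest (by simp)

theorem pvStepA_append (cats : List String) (k : Int) (x : Int × String) (b : Bool)
    (a1 a2 : List String) :
    pvStepA cats k (b, a1 ++ a2) x = ((pvStepA cats k (b, a2) x).1, a1 ++ (pvStepA cats k (b, a2) x).2) := by
  simp only [pvStepA]
  split_ifs <;> simp

theorem pvStepB_append (k : Int) (x : String × Option Int) (b : Bool) (a1 a2 : List String) :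
    pvStepB k (b, a1 ++ a2) x = ((pvStepB k (b, a2) x).1, a1 ++ (pvStepB k (b, a2) x).2) := by
  obtain ⟨c, dopt⟩ := x
  cases dopt <;> simp only [pvStepB] <;> split_ifs <;> simp

theorem pvFoldA_acc (cats : List String) (k : Int) :
    ∀ (l : List (Int × String)) (b : Bool) (a : List String),
      (List.foldl (pvStepA cats k) (b, a) l).2 = a ++ (List.foldl (pvStepA cats k) (b, []) l).2 := by
  intro l
  induction l with
  | nil => intro b a; simp
  | cons x l ih =>
    intro b a
    have hx : pvStepA cats k (b, a) x =
        ((pvStepA cats k (b, []) x).1, a ++ (pvStepA cats k (b, []) x).2) := by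
      simpa using pvStepA_append cats k x b a []
    simp only [List.foldl_cons, hx]
    rw [ih, ih (pvStepA cats k (b, []) x).1 (pvStepA cats k (b, []) x).2, List.append_assoc]

theorem pvFoldB_acc (k : Int) :
    ∀ (l : List (String × Option Int)) (b : Bool) (a : List String),
      (List.foldl (pvStepB k) (b, a) l).2 = a ++ (List.foldl (pvStepB k) (b, []) l).2 := by
  intro l
  induction l with
  | nil => intro b a; simp
  | cons x l ih =>
    intro b a
    have hx : pvStepB k (b, a) x =
        ((pvStepB k (b, []) x).1, a ++ (pvStepB k (b, []) x).2) := by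
      simpa using pvStepB_append k x b a []
    simp only [List.foldl_cons, hx]
    rw [ih, ih (pvStepB k (b, []) x).1 (pvStepB k (b, []) x).2, List.append_assoc]

-- for a wrapped (negative) stop index, membership in A's look-ahead slice
theorem pvSliceNegChar (cats : List String) (k : Int) (iN : Nat)
    (hneg : (iN : Int) + 1 + k < 0) (hlt : iN < cats.length) :
    ("expensive" ∈ PySem.List.slice cats (some ((iN : Int) + 1)) (some ((iN : Int) + 1 + k))) ↔
      ∃ j < cats.length, iN < j ∧
        (j : Int) < (cats.length : Int) + (iN : Int) + 1 + k ∧ cats[j]? = some "expensive" := by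
  have hcast : (iN : Int) + 1 = ((iN + 1 : Nat) : Int) := by push_cast; ring
  set m := (-((iN : Int) + 1 + k)).toNat with hmdef
  have hmInt : (m : Int) = -((iN : Int) + 1 + k) := by omega
  have hmin : min (iN + 1) cats.length = iN + 1 := by omega
  have hslice : PySem.List.slice cats (some ((iN : Int) + 1)) (some ((iN : Int) + 1 + k)) =
      (cats.drop (iN + 1)).take (cats.length - m - (iN + 1)) := by
    have hs0 : PySem.List.slice cats (some ((iN : Int) + 1)) (some ((iN : Int) + 1 + k)) =
        (cats.drop (PySem.List.clampIdx cats.length ((iN : Int) + 1))).take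
          (PySem.List.clampIdx cats.length ((iN : Int) + 1 + k) -
            PySem.List.clampIdx cats.length ((iN : Int) + 1)) := by
      simp [PySem.List.slice]
    rw [hs0, pvClampNeg _ _ hneg, hcast, PySem.List.clampIdx_natCast, hmin]
    congr 1
  rw [hslice]
  have hdlen : (cats.drop (iN + 1)).length = cats.length - (iN + 1) := List.length_drop
  constructor
  · intro hmem
    obtain ⟨p, hp, hpeq⟩ := List.mem_take_iff_getElem.mp hmem
    have hp1 : p < cats.length - m - (iN + 1) := lt_of_lt_of_le hp (min_le_left _ _)
    have hp2 : p < cats.length - (iN + 1) := by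
      have h := lt_of_lt_of_le hp (min_le_right _ _)
      rwa [hdlen] at h
    refine ⟨iN + 1 + p, by omega, by omega, by omega, ?_⟩
    have hopt : (cats.drop (iN + 1))[p]? = some "expensive" := by
      rw [List.getElem?_eq_getElem (by omega)]
      exact congrArg some hpeq
    rwa [List.getElem?_drop] at hopt
  · rintro ⟨j, hjlt, hij, hjk, hje⟩
    have hjn : j < cats.length - m := by
      have hj' : (j : Int) < (cats.length : Int) - (m : Int) := by omega
      omega
    refine List.mem_take_iff_getElem.mpr ⟨j - (iN + 1), by rw [hdlen]; omega, ?_⟩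
    have h2 : (cats.drop (iN + 1))[j - (iN + 1)]? = some "expensive" := by
      rw [List.getElem?_drop, show iN + 1 + (j - (iN + 1)) = j by omega]
      exact hje
    obtain ⟨hbnd, hval⟩ := List.getElem?_eq_some_iff.mp h2
    exact hval

-- for bridge_max_slots < 0, A and B diverge at the first wrapped HOLD
theorem pvLoop_ne (cats : List String) (k : Int) (hk : k < 0) :
    ∀ (suf : List String) (iN : Nat) (b : Bool) (acc : List String),
      suf = cats.drop iN →
      (∃ i : Nat, iN ≤ i ∧ i < cats.length ∧ 1 ≤ i ∧
        cats[i-1]? = some "expensive" ∧ cats[i]? ≠ some "expensive" ∧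
        (i : Int) + 1 + k < 0 ∧
        (∃ j < cats.length, i < j ∧
          (j : Int) < (cats.length : Int) + (i : Int) + 1 + k ∧ cats[j]? = some "expensive")) →
      (b = false → 1 ≤ iN → cats[iN-1]? ≠ some "expensive") →
      ((suf.zip (pvDistTable suf).2).foldl (pvStepB k) (b, acc)).2 ≠
        ((PySem.List.enumerate suf (iN : Int)).foldl (pvStepA cats k) (b, acc)).2 := by
  intro suf
  induction suf with
  | nil =>
    intro iN b acc hsuf hpat _
    exfalso
    obtain ⟨i, hle, hilt, _⟩ := hpat
    have : cats.length ≤ iN := by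
      have := congrArg List.length hsuf
      simp at this
      omega
    omega
  | cons c rest ih =>
    intro iN b acc hsuf hpat hinv
    have hlt : iN < cats.length := by
      by_contra hge
      rw [List.drop_eq_nil_of_le (by omega)] at hsuf
      simp at hsuf
    have hc : cats[iN]? = some c := by
      have h : (cats.drop iN).head? = cats[iN]? := List.head?_drop
      rw [← hsuf] at h
      simpa using h.symm
    have hrest : rest = cats.drop (iN + 1) := by
      have h2 := congrArg List.tail hsuf
      simpa [List.tail_drop] using h2
    have hcast : (iN : Int) + 1 = ((iN + 1 : Nat) : Int) := by push_cast; ring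
    rw [pvDistTable_cons, List.zip_cons_cons, List.foldl_cons, PySem.List.enumerate_cons,
      List.foldl_cons]
    by_cases hcexp : c = "expensive"
    · -- PRICE_BRAKE on both sides, pattern lies strictly ahead
      have hA : pvStepA cats k (b, acc) ((iN : Int), c) = (true, acc ++ ["PRICE_BRAKE"]) := by
        simp [pvStepA, hcexp]
      have hB : pvStepB k (b, acc) (c, (pvDistTable rest).1) = (true, acc ++ ["PRICE_BRAKE"]) := by
        simp [pvStepB, hcexp]
      rw [hA, hB, hcast]
      refine ih (iN + 1) true (acc ++ ["PRICE_BRAKE"]) hrest ?_ (by simp)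
      obtain ⟨i, hle, hp⟩ := hpat
      refine ⟨i, ?_, hp⟩
      rcases Nat.eq_or_lt_of_le hle with rfl | h
      · exact absurd (hc.trans (by rw [hcexp])) hp.2.2.2.1
      · omega
    · by_cases hb : b = true
      · subst hb
        by_cases hmem : "expensive" ∈ PySem.List.slice cats (some ((iN : Int) + 1))
            (some ((iN : Int) + 1 + k))
        · -- A holds, B ramps down: the outputs differ at position acc.length
          have hA : pvStepA cats k (true, acc) ((iN : Int), c) = (true, acc ++ ["HOLD"]) := by
            simp [pvStepA, hcexp, hmem]
          have hB : pvStepB k (true, acc) (c, (pvDistTable rest).1) =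
              (false, acc ++ ["RAMP_DOWN"]) := by
            cases hd : (pvDistTable rest).1 with
            | none => simp [pvStepB, hcexp]
            | some d =>
              have hnle : ¬ d ≤ k := by have := pvDistTable_pos _ _ hd; omega
              simp [pvStepB, hcexp, hnle]
          rw [hA, hB]
          intro heq
          rw [pvFoldA_acc, pvFoldB_acc] at heq
          rw [List.append_assoc, List.append_assoc] at heq
          have := List.append_cancel_left heq
          simp at this
        · -- both ramp down; the pattern index cannot be iN, so it lies ahead
          have hA : pvStepA cats k (true, acc) ((iN : Int), c) = (false, acc ++ ["RAMP_DOWN"]) := by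
            simp [pvStepA, hcexp, hmem]
          have hB : pvStepB k (true, acc) (c, (pvDistTable rest).1) =
              (false, acc ++ ["RAMP_DOWN"]) := by
            cases hd : (pvDistTable rest).1 with
            | none => simp [pvStepB, hcexp]
            | some d =>
              have hnle : ¬ d ≤ k := by have := pvDistTable_pos _ _ hd; omega
              simp [pvStepB, hcexp, hnle]
          rw [hA, hB, hcast]
          refine ih (iN + 1) false (acc ++ ["RAMP_DOWN"]) hrest ?_
            (fun _ _ => by simpa [hc] using hcexp)
          obtain ⟨i, hle, hp⟩ := hpat
          refine ⟨i, ?_, hp⟩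
          rcases Nat.eq_or_lt_of_le hle with rfl | h
          · exact absurd ((pvSliceNegChar cats k iN hp.2.2.2.2.1 hp.1).mpr hp.2.2.2.2.2) hmem
          · omega
      · have hbf : b = false := by cases b with | true => exact absurd rfl hb | false => rfl
        subst hbf
        have hnext : (if (iN : Int) + 1 < (cats.length : Int) then
              PySem.List.pyGet? cats ((iN : Int) + 1) else none) = rest.head? := by
          by_cases hlt2 : iN + 1 < cats.length
          · rw [if_pos (by omega), hcast, PySem.List.pyGet?_natCast, hrest, List.head?_drop]
          · rw [if_neg (by omega), hrest, List.drop_eq_nil_of_le (by omega)]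
            rfl
        have hahead : ∀ i : Nat, iN ≤ i → i < cats.length → 1 ≤ i →
            cats[i-1]? = some "expensive" → iN + 1 ≤ i := by
          intro i hle hilt h1i hpv
          rcases Nat.eq_or_lt_of_le hle with rfl | h
          · exact absurd hpv (hinv rfl h1i)
          · omega
        obtain ⟨i, hle, hp⟩ := hpat
        have hle' : iN + 1 ≤ i := hahead i hle hp.1 hp.2.1 hp.2.2.1
        by_cases hpre : (pvDistTable rest).1 = some 1
        · have hhead : rest.head? = some "expensive" := (pvDistTable_one rest).mp hpre
          have hA : pvStepA cats k (false, acc) ((iN : Int), c) = (true, acc ++ ["PRE_BRAKE"]) := by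
            simp [pvStepA, hcexp, hnext, hhead]
          have hB : pvStepB k (false, acc) (c, (pvDistTable rest).1) =
              (true, acc ++ ["PRE_BRAKE"]) := by
            simp [pvStepB, hcexp, hpre]
          rw [hA, hB, hcast]
          exact ih (iN + 1) true (acc ++ ["PRE_BRAKE"]) hrest ⟨i, hle', hp⟩ (by simp)
        · have hhead : rest.head? ≠ some "expensive" :=
            fun h => hpre ((pvDistTable_one rest).mpr h)
          have hA : pvStepA cats k (false, acc) ((iN : Int), c) = (false, acc ++ ["NORMAL"]) := by
            simp [pvStepA, hcexp, hnext, hhead]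
          have hB : pvStepB k (false, acc) (c, (pvDistTable rest).1) =
              (false, acc ++ ["NORMAL"]) := by
            simp [pvStepB, hcexp, hpre]
          rw [hA, hB, hcast]
          exact ih (iN + 1) false (acc ++ ["NORMAL"]) hrest ⟨i, hle', hp⟩
            (fun _ _ => by simpa [hc] using hcexp)

-- ===== VERDICT (by name: the statement is the Claim_ definition above) =====
theorem simulate_brake_states_spec : Claim_unchanged_simulate_brake_states := by
  intro cats k _ hND
  unfold simulate_brake_states simulate_brake_states_alt
  rw [show ((0 : Int)) = ((0 : Nat) : Int) by norm_num,
    ← pvLoop_eq cats k hND cats 0 false [] (by simp) (by simp)]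

theorem simulate_brake_states_changed : Claim_changed_simulate_brake_states := by
  unfold Claim_changed_simulate_brake_states; decide

theorem simulate_brake_states_tight : Claim_exact_simulate_brake_states := by
  intro cats k _ hD
  obtain ⟨hk, i, hilt, h1i, hprev, hcur, hneg, hj⟩ := hD
  unfold simulate_brake_states simulate_brake_states_alt
  refine fun h => pvLoop_ne cats k hk cats 0 false [] (by simp)
    ⟨i, Nat.zero_le _, hilt, h1i, hprev, hcur, hneg, hj⟩
    (fun _ h10 => absurd h10 (by omega)) ?_
  rw [show ((0 : Int)) = ((0 : Nat) : Int) by norm_num] at h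
  exact h.symm
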